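-- pv_equiv track=rewrite | github.com/d1mid/- | src/bot/services/catalog_service.py | extract_budget
-- ===== SOURCE A (Python) =====
-- def extract_budget(text: str) -> int | None:
--     digits = []
--     current = ""
--     for char in text:
--         if char.isdigit():
--             current += char
--         elif current:
--             digits.append(current)
--             current = ""
--     if current:
--         digits.append(current)
--
--     if not digits:
--         return None
--     try:
--         return int(max(digits, key=len))
--     except ValueError:
--         return None
-- ===== SOURCE B (Python) =====
-- def extract_budget(text: str) -> int | None:
--     # Kadane-style scan: track the length of the digit run ending at each index
--     # and the end position of the first longest run; slice it out at the end.
--     best = 0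
--     end = -1
--     run = 0
--     for i, ch in enumerate(text):
--         run = run + 1 if ch.isdigit() else 0
--         if best < run:
--             best = run
--             end = i
--     if best == 0:
--         return None
--     return int(text[end - best + 1 : end + 1])
-- ===== Notes on version B (the rewrite author's own statement) =====
-- stated objective: alternative
-- what changed: B never materializes the digit runs: a Kadane-style scan tracks only the length and end index of the first longest digit run (run-length DP over positions) and slices it out of the text once at the end, instead of A's building a list of run strings and calling max(key=len).
import Mathlib
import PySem

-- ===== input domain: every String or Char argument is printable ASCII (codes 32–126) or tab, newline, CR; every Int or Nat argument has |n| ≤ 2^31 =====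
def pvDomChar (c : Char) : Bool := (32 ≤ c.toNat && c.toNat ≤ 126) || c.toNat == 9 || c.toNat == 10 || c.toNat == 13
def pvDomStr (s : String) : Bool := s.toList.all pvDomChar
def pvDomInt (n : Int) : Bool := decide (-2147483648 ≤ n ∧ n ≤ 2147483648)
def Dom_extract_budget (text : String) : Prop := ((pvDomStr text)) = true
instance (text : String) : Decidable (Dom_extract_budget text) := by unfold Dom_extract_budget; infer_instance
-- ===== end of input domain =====

-- B replaces A's run-collecting pass (build the list of digit runs, then max by length)
-- with a Kadane-style index scan that only tracks the length and end position of the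
-- first longest run and slices it out at the end (alternative decomposition, same O(n)).

-- ===== PORT A =====
-- A's for-loop over the characters with state (digits, current), plus the trailing
-- 'if current: digits.append(current)' folded into the base case of the recursion.
def extractLoopA : List Char → List (List Char) → List Char → List (List Char)
  | [], digits, current => if current ≠ [] then digits ++ [current] else digits
  | c :: rest, digits, current =>
    if PySem.Chars.isdigit c then extractLoopA rest digits (current ++ [c])
    else if current ≠ [] then extractLoopA rest (digits ++ [current]) []
    else extractLoopA rest digits current

def extract_budget (text : String) : Option Int :=
  let digits := extractLoopA text.toList [] []
  if digits = [] then none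
  else
    match PySem.List.max? digits (fun r => r.length) with
    | some m =>
      -- try: return int(m) except ValueError: return None
      match PySem.Int.ofChars? m with
      | some v => some v
      | none => none
    | none => none

-- ===== PORT B =====
-- the body of B's 'for i, ch in enumerate(text)' loop, state (best, end, run)
def scanStep (st : Int × Int × Int) (ic : Int × Char) : Int × Int × Int :=
  let run := if PySem.Chars.isdigit ic.2 then st.2.2 + 1 else 0
  if st.1 < run then (run, ic.1, run) else (st.1, st.2.1, run)

def extract_budget_alt (text : String) : Option Int :=
  let st := (PySem.List.enumerate text.toList).foldl scanStep (0, -1, 0)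
  if st.1 = 0 then none
  else PySem.Int.ofChars? (PySem.List.slice text.toList (some (st.2.1 - st.1 + 1)) (some (st.2.1 + 1)))

-- ===== PRECONDITION & SPEC =====
def Spec_extract_budget (text : String) (out : Option Int) : Prop := out = extract_budget_alt text
instance (text : String) (out : Option Int) : Decidable (Spec_extract_budget text out) := by unfold Spec_extract_budget; infer_instance

-- ===== CLAIM =====
def Claim_equal_extract_budget : Prop := ∀ (text : String), Dom_extract_budget text → Spec_extract_budget text (extract_budget text)

-- ===== LEMMAS AND PROOFS =====

-- Python's max(key=len) tie-break: first element of greatest length.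
def pickLong (b y : List Char) : List Char := if b.length < y.length then y else b
def firstMax (r : List Char) (t : List (List Char)) : List Char := t.foldl pickLong r

-- the selected run on A's side (none iff no runs)
def selA : List (List Char) → Option (List Char)
  | [] => none
  | r :: t => some (firstMax r t)

-- the selected run on B's side: slice of the text determined by the final (best, end)
def selB (st : Int × Int × Int) (f : List Char) : Option (List Char) :=
  if st.1 = 0 then none else some (PySem.List.slice f (some (st.2.1 - st.1 + 1)) (some (st.2.1 + 1)))

def bestD (ds : List (List Char)) : Nat := ds.foldl (fun m d => max m d.length) 0

theorem max?_cons_firstMax (t : List (List Char)) : ∀ (x : List Char),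
    PySem.List.max? (x :: t) (fun r => r.length) = some (firstMax x t) := by
  induction t with
  | nil => intro x; rfl
  | cons a t ih =>
    intro x
    have hx := ih x
    have ha := ih a
    simp only [PySem.List.max?, List.foldl_cons] at *
    by_cases h : x.length < a.length
    · simp only [firstMax, List.foldl_cons, pickLong, if_pos h] at *
      simpa [h] using ha
    · simp only [firstMax, List.foldl_cons, pickLong, if_neg h] at *
      simpa [h] using hx

theorem len_firstMax (t : List (List Char)) (r : List Char) :
    (firstMax r t).length = t.foldl (fun m d => max m d.length) r.length := by
  induction t generalizing r with
  | nil => rfl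
  | cons a t ih =>
    simp only [firstMax, List.foldl_cons] at *
    rw [ih]
    have : (pickLong r a).length = max r.length a.length := by
      unfold pickLong; split <;> omega
    rw [this]

theorem bestD_cons (r : List Char) (t : List (List Char)) :
    bestD (r :: t) = t.foldl (fun m d => max m d.length) r.length := by
  simp [bestD]

theorem bestD_concat (ds : List (List Char)) (x : List Char) :
    bestD (ds ++ [x]) = max (bestD ds) x.length := by
  simp [bestD, List.foldl_append]

theorem len_le_bestD (ds : List (List Char)) (d : List Char) (h : d ∈ ds) :
    d.length ≤ bestD ds :=
  (PySem.List.le_foldl_max_nat ds List.length 0).2 d h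

theorem bestD_zero (ds : List (List Char)) (h : bestD ds = 0)
    (hne : ∀ d ∈ ds, d ≠ []) : ds = [] := by
  cases ds with
  | nil => rfl
  | cons r t =>
    exfalso
    have h1 : r.length ≤ bestD (r :: t) := len_le_bestD _ _ (List.mem_cons_self)
    have h2 : r ≠ [] := hne r (List.mem_cons_self)
    have : 0 < r.length := List.length_pos_of_ne_nil h2
    omega

theorem selA_concat (ds : List (List Char)) (x : List Char) :
    selA (ds ++ [x]) = some (match ds with | [] => x | r :: t => pickLong (firstMax r t) x) := by
  cases ds with
  | nil => rfl
  | cons r t => simp [selA, firstMax, List.foldl_append]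

theorem drop_take_append (l r : List Char) (k n : Nat) (h : k + n ≤ l.length) :
    ((l ++ r).drop k).take n = (l.drop k).take n := by
  rw [List.drop_append_of_le_length (by omega)]
  rw [List.take_append_of_le_length (by simp; omega)]

theorem drop_suffix (p cur : List Char) :
    ((p ++ cur).drop ((p ++ cur).length - cur.length)) = cur := by
  have : (p ++ cur).length - cur.length = p.length := by simp
  rw [this, List.drop_left]

-- the main loop invariant: A's state (digits, cur) versus B's state (best, end, run)
theorem scan_main :
    ∀ (cs left : List Char) (digits : List (List Char)) (cur : List Char) (endv : Int),
      cur <:+ left →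
      (∀ d ∈ digits, d ≠ []) →
      (bestD digits < cur.length → endv = (left.length : Int) - 1) →
      (0 < bestD digits → cur.length ≤ bestD digits →
        ∃ e : Nat, endv = (e : Int) ∧ bestD digits ≤ e + 1 ∧ e + 1 ≤ left.length ∧
          (left.drop (e + 1 - bestD digits)).take (bestD digits)
            = (match digits with | [] => [] | r :: t => firstMax r t)) →
      selA (extractLoopA cs digits cur)
        = selB ((PySem.List.enumerate cs (left.length : Int)).foldl scanStep
                ((max (bestD digits) cur.length : Nat), endv, (cur.length : Int)))
               (left ++ cs) := by
  intro cs
  induction cs with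
  | nil =>
    intro left digits cur endv hsuf hne h4a h4b
    rw [show PySem.List.enumerate ([] : List Char) ((left.length : Nat) : Int) = [] from rfl]
    simp only [List.foldl_nil, List.append_nil, extractLoopA]
    by_cases hc : cur = []
    · simp only [hc, ne_eq, not_true_eq_false, if_false, List.length_nil, Nat.max_zero]
      by_cases hbd : bestD digits = 0
      · have hd0 : digits = [] := bestD_zero _ hbd hne
        subst hd0
        simp [selA, selB, hbd]
      · obtain ⟨e, he, h1, h2, h3⟩ := h4b (by omega) (by simp [hc])
        cases digits with
        | nil => simp [bestD] at hbd
        | cons r t =>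
          simp only [selA, selB, he]
          rw [if_neg (by exact_mod_cast hbd)]
          have ha : (e : Int) - (bestD (r :: t) : Int) + 1 = ((e + 1 - bestD (r :: t) : Nat) : Int) := by
            omega
          have hb : (e : Int) + 1 = ((e + 1 : Nat) : Int) := by push_cast; ring
          rw [ha, hb, PySem.List.slice_natCast]
          have hsub : e + 1 - (e + 1 - bestD (r :: t)) = bestD (r :: t) := by omega
          rw [hsub]
          exact congrArg some h3.symm
    · simp only [hc, ne_eq, not_false_eq_true, if_true]
      rw [selA_concat]
      obtain ⟨p, hp⟩ := hsuf
      by_cases hlt : bestD digits < cur.length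
      · have hmax : max (bestD digits) cur.length = cur.length := by omega
        have hcl : 0 < cur.length := List.length_pos_of_ne_nil hc
        have hlen : cur.length ≤ left.length := List.IsSuffix.length_le ⟨p, hp⟩
        have he := h4a hlt
        simp only [selB, hmax, he]
        rw [if_neg (by omega)]
        have ha : (left.length : Int) - 1 - (cur.length : Int) + 1
            = ((left.length - cur.length : Nat) : Int) := by omega
        have hb : (left.length : Int) - 1 + 1 = ((left.length : Nat) : Int) := by ring
        rw [ha, hb, PySem.List.slice_natCast]
        have hsub : left.length - (left.length - cur.length) = cur.length := by omega
        rw [hsub]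
        have hdrop : left.drop (left.length - cur.length) = cur := by
          rw [← hp]; exact drop_suffix p cur
        rw [hdrop, List.take_length]
        cases digits with
        | nil => rfl
        | cons r t =>
          have : (firstMax r t).length = bestD (r :: t) := by
            rw [len_firstMax, bestD_cons]
          simp only [pickLong, this, if_pos hlt]
      · have hle : cur.length ≤ bestD digits := by omega
        have hbd : 0 < bestD digits := by
          have : 0 < cur.length := List.length_pos_of_ne_nil hc
          omega
        have hmax : max (bestD digits) cur.length = bestD digits := by omega
        obtain ⟨e, he, h1, h2, h3⟩ := h4b hbd hle
        cases digits with
        | nil => simp [bestD] at hbd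
        | cons r t =>
          have hfl : (firstMax r t).length = bestD (r :: t) := by
            rw [len_firstMax, bestD_cons]
          simp only [selB, hmax, he]
          rw [if_neg (by exact_mod_cast Nat.pos_iff_ne_zero.mp hbd)]
          have ha : (e : Int) - (bestD (r :: t) : Int) + 1 = ((e + 1 - bestD (r :: t) : Nat) : Int) := by
            omega
          have hb : (e : Int) + 1 = ((e + 1 : Nat) : Int) := by push_cast; ring
          rw [ha, hb, PySem.List.slice_natCast]
          have hsub : e + 1 - (e + 1 - bestD (r :: t)) = bestD (r :: t) := by omega
          rw [hsub, h3]
          simp only [pickLong, hfl, if_neg (by omega : ¬ bestD (r :: t) < cur.length)]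
  | cons c cs ih =>
    intro left digits cur endv hsuf hne h4a h4b
    have henum : PySem.List.enumerate (c :: cs) ((left.length : Nat) : Int)
        = (((left.length : Nat) : Int), c) :: PySem.List.enumerate cs (((left.length : Nat) : Int) + 1) := by
      simp [PySem.List.enumerate]
    rw [henum, List.foldl_cons]
    have hcast : ((left.length : Nat) : Int) + 1 = (((left ++ [c]).length : Nat) : Int) := by
      simp
    have happ : left ++ c :: cs = (left ++ [c]) ++ cs := by simp
    by_cases hd : PySem.Chars.isdigit c = true
    · -- digit character: A extends cur; B's run becomes cur.length + 1
      have hA : extractLoopA (c :: cs) digits cur = extractLoopA cs digits (cur ++ [c]) := by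
        simp [extractLoopA, hd]
      have hsuf' : (cur ++ [c]) <:+ (left ++ [c]) := by
        obtain ⟨p, hp⟩ := hsuf
        exact ⟨p, by rw [← hp, List.append_assoc]⟩
      by_cases hbc : bestD digits ≤ cur.length
      · -- run exceeds best: update (best, end)
        have hstep : scanStep (((max (bestD digits) cur.length : Nat) : Int), endv, ((cur.length : Nat) : Int))
            (((left.length : Nat) : Int), c)
            = (((max (bestD digits) (cur ++ [c]).length : Nat) : Int), ((left.length : Nat) : Int),
               (((cur ++ [c]).length : Nat) : Int)) := by
          have hl : (cur ++ [c]).length = cur.length + 1 := by simp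
          have hm : max (bestD digits) (cur ++ [c]).length = cur.length + 1 := by
            rw [hl]; omega
          simp only [scanStep, hd, if_true]
          rw [if_pos (by push_cast; omega), hm, hl]
          push_cast
          rfl
        rw [hA, hstep, hcast, happ]
        refine ih (left ++ [c]) digits (cur ++ [c]) _ hsuf' hne ?_ ?_
        · intro _
          simp
        · intro _ hcon
          exfalso; simp at hcon; omega
      · -- run still below best: keep (best, end)
        have hstep : scanStep (((max (bestD digits) cur.length : Nat) : Int), endv, ((cur.length : Nat) : Int))
            (((left.length : Nat) : Int), c)
            = (((max (bestD digits) (cur ++ [c]).length : Nat) : Int), endv,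
               (((cur ++ [c]).length : Nat) : Int)) := by
          have hl : (cur ++ [c]).length = cur.length + 1 := by simp
          have hm : max (bestD digits) (cur ++ [c]).length = bestD digits := by
            rw [hl]; omega
          have hm2 : max (bestD digits) cur.length = bestD digits := by omega
          simp only [scanStep, hd, if_true]
          rw [if_neg (by push_cast; omega), hm, hm2, hl]
          push_cast
          rfl
        rw [hA, hstep, hcast, happ]
        refine ih (left ++ [c]) digits (cur ++ [c]) _ hsuf' hne ?_ ?_
        · intro hcon
          exfalso; simp at hcon; omega
        · intro hpos hle
          obtain ⟨e, he, h1, h2, h3⟩ := h4b hpos (by simp at hle; omega)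
          refine ⟨e, he, h1, by simp; omega, ?_⟩
          rw [drop_take_append _ _ _ _ (by omega)]
          exact h3
    · -- non-digit character: A closes cur; B's run resets to 0
      have hrun0 : scanStep (((max (bestD digits) cur.length : Nat) : Int), endv, ((cur.length : Nat) : Int))
          (((left.length : Nat) : Int), c)
          = (((max (bestD digits) cur.length : Nat) : Int), endv, 0) := by
        simp only [scanStep, hd]
        rw [if_neg (by push_cast; omega)]
        simp
      rw [hrun0]
      by_cases hc : cur = []
      · have hA : extractLoopA (c :: cs) digits cur = extractLoopA cs digits [] := by
          simp [extractLoopA, hd, hc]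
        have hmax' : ((max (bestD digits) cur.length : Nat) : Int)
            = ((max (bestD digits) (List.length ([] : List Char)) : Nat) : Int) := by
          simp [hc]
        have h0 : (0 : Int) = ((List.length ([] : List Char) : Nat) : Int) := by simp
        rw [hA, hmax', h0, hcast, happ]
        refine ih (left ++ [c]) digits [] _ List.nil_suffix hne ?_ ?_
        · intro hcon; exfalso; simp at hcon
        · intro hpos _
          obtain ⟨e, he, h1, h2, h3⟩ := h4b hpos (by simp [hc])
          refine ⟨e, he, h1, by simp; omega, ?_⟩
          rw [drop_take_append _ _ _ _ (by omega)]
          exact h3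
      · have hA : extractLoopA (c :: cs) digits cur = extractLoopA cs (digits ++ [cur]) [] := by
          simp [extractLoopA, hd, hc]
        have hmax' : ((max (bestD digits) cur.length : Nat) : Int)
            = ((max (bestD (digits ++ [cur])) (List.length ([] : List Char)) : Nat) : Int) := by
          simp [bestD_concat]
        have h0 : (0 : Int) = ((List.length ([] : List Char) : Nat) : Int) := by simp
        have hne' : ∀ d ∈ digits ++ [cur], d ≠ [] := by
          intro d hmem
          rcases List.mem_append.mp hmem with h | h
          · exact hne d h
          · simp at h; subst h; exact hc
        have hcl : 0 < cur.length := List.length_pos_of_ne_nil hc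
        have hlen : cur.length ≤ left.length := List.IsSuffix.length_le hsuf
        rw [hA, hmax', h0, hcast, happ]
        refine ih (left ++ [c]) (digits ++ [cur]) [] _ List.nil_suffix hne' ?_ ?_
        · intro hcon; exfalso; simp at hcon
        · intro hpos _
          by_cases hlt : bestD digits < cur.length
          · -- cur itself is the (first) longest run so far
            have he := h4a hlt
            have hbd' : bestD (digits ++ [cur]) = cur.length := by
              rw [bestD_concat]; omega
            refine ⟨left.length - 1, by rw [he]; omega, ?_, ?_, ?_⟩
            · omega
            · have hLL : (left ++ [c]).length = left.length + 1 := by simp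
              omega
            · have hsub : left.length - 1 + 1 - bestD (digits ++ [cur]) = left.length - cur.length := by
                rw [hbd']; omega
              rw [hsub, hbd']
              rw [drop_take_append _ _ _ _ (by omega)]
              obtain ⟨p, hp⟩ := hsuf
              have hdrop : left.drop (left.length - cur.length) = cur := by
                rw [← hp]; exact drop_suffix p cur
              rw [hdrop, List.take_length]
              cases digits with
              | nil => rfl
              | cons r t =>
                have hfl : (firstMax r t).length = bestD (r :: t) := by
                  rw [len_firstMax, bestD_cons]
                show cur = firstMax r (t ++ [cur])
                simp only [firstMax, List.foldl_append, List.foldl_cons, List.foldl_nil]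
                show cur = pickLong (firstMax r t) cur
                simp only [pickLong, hfl, if_pos hlt]
          · -- the longest run is still inside digits
            have hle : cur.length ≤ bestD digits := by omega
            have hbd : 0 < bestD digits := by omega
            have hbd' : bestD (digits ++ [cur]) = bestD digits := by
              rw [bestD_concat]; omega
            obtain ⟨e, he, h1, h2, h3⟩ := h4b hbd hle
            refine ⟨e, he, by omega, by simp; omega, ?_⟩
            rw [hbd', drop_take_append _ _ _ _ (by omega), h3]
            cases digits with
            | nil => simp [bestD] at hbd
            | cons r t =>
              have hfl : (firstMax r t).length = bestD (r :: t) := by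
                rw [len_firstMax, bestD_cons]
              show firstMax r t = firstMax r (t ++ [cur])
              simp only [firstMax, List.foldl_append, List.foldl_cons, List.foldl_nil]
              show firstMax r t = pickLong (firstMax r t) cur
              simp only [pickLong, hfl, if_neg (by omega : ¬ bestD (r :: t) < cur.length)]

-- ===== VERDICT =====
theorem extract_budget_spec : Claim_equal_extract_budget := by
  intro text _
  unfold Spec_extract_budget extract_budget extract_budget_alt
  have H := scan_main text.toList [] [] [] (-1) List.nil_suffix (by simp)
    (by intro h; simp [bestD] at h) (by intro h; simp [bestD] at h)
  simp only [bestD, List.foldl_nil, List.length_nil, Nat.cast_zero, Nat.max_self,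
    List.nil_append] at H
  rcases hst : List.foldl scanStep (0, -1, 0) (PySem.List.enumerate text.toList 0) with ⟨b, ev, r⟩
  rw [hst] at H
  cases hruns : extractLoopA text.toList [] [] with
  | nil =>
    rw [hruns] at H
    simp only [selA, selB] at H
    rw [if_pos rfl]
    by_cases hb : b = 0
    · simp [hb]
    · rw [if_neg hb] at H
      simp at H
  | cons rr tt =>
    rw [hruns] at H
    simp only [selA, selB] at H
    rw [if_neg (by simp), max?_cons_firstMax]
    by_cases hb : b = 0
    · rw [if_pos hb] at H; simp at H
    · rw [if_neg hb] at H ⊢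
      rw [Option.some.injEq] at H
      rw [← H]
      cases h2 : PySem.Int.ofChars? (firstMax rr tt) <;> simp [h2]
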